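-- pv_equiv track=rewrite | github.com/wiseman-timelord/Chat-Gradio-Gguf | scripts/interface.py | build_progress_html
-- ===== SOURCE A (Python) =====
-- def build_progress_html(step: int, web_search_enabled: bool = False, speech_enabled: bool = False):
--     """
--     Build dynamic progress indicator HTML based on enabled features.
--
--     Cases:
--     1. Vanilla (no web search, no speech): 9 steps
--     2. Web search only: 11 steps (adds "Producing Research", "Assessing Research")
--     3. Speech only: 10 steps (adds "Generating TTS")
--     4. Both enabled: 12 steps (all additional steps)
--     """
--     # Base phases (always present)
--     base_phases = [
--         "Handle Input",      # 0
--         "Build Prompt",      # 1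
--         "Inject RAG",        # 2
--         "Add System",        # 3
--         "Assemble History",  # 4
--         "Check Model",       # 5
--         "Generate Stream",   # 6
--         "Split Thinking",    # 7
--         "Format Response"    # 8
--     ]
--
--     # Build dynamic phase list based on enabled features
--     phases = base_phases[:6]  # Handle Input through Check Model
--
--     # Insert web search phases after "Check Model" (before Generate Stream)
--     if web_search_enabled:
--         phases.append("Producing Research")
--         phases.append("Assessing Research")
--
--     # Add generation and processing phases
--     phases.append("Generate Stream")
--     phases.append("Split Thinking")
--     phases.append("Format Response")
--
--     # Add TTS phase at the end if speech is enabled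
--     if speech_enabled:
--         phases.append("Generating TTS")
--
--     # Build HTML segments
--     segments = []
--     for i, phase in enumerate(phases):
--         if i < step:
--             color = "#00ff00"  # Completed - green
--         elif i == step:
--             color = "#4488ff"  # Current - blue
--         else:
--             color = "#666666"  # Pending - gray
--         segments.append(f'<span style="color:{color}; font-weight:bold;">{phase}</span>')
--
--     return " → ".join(segments)
-- ===== SOURCE B (Python) =====
-- def build_progress_html(step: int, web_search_enabled: bool = False, speech_enabled: bool = False):
--     phases = (
--         ["Handle Input", "Build Prompt", "Inject RAG", "Add System",
--          "Assemble History", "Check Model"]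
--         + (["Producing Research", "Assessing Research"] if web_search_enabled else [])
--         + ["Generate Stream", "Split Thinking", "Format Response"]
--         + (["Generating TTS"] if speech_enabled else [])
--     )
--
--     def render(ps, k):
--         # k counts down: k > 0 completed, k == 0 current, k < 0 pending
--         color = "#00ff00" if k > 0 else "#4488ff" if k == 0 else "#666666"
--         head = f'<span style="color:{color}; font-weight:bold;">{ps[0]}</span>'
--         return head if len(ps) == 1 else head + " → " + render(ps[1:], k - 1)
--
--     return render(phases, step)
-- ===== Notes on version B (the rewrite author's own statement) =====
-- stated objective: alternative
-- what changed: Replaces A's indexed enumerate loop that accumulates a segments list and then joins it by a direct recursive renderer: it builds the final string head-first with ' -> ' interleaved on the fly, carrying a countdown k = step - position (k>0 completed, k==0 current, k<0 pending) instead of comparing an index against step; the phase list is built in one conditional-concatenation expression instead of staged appends.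
import Mathlib
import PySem

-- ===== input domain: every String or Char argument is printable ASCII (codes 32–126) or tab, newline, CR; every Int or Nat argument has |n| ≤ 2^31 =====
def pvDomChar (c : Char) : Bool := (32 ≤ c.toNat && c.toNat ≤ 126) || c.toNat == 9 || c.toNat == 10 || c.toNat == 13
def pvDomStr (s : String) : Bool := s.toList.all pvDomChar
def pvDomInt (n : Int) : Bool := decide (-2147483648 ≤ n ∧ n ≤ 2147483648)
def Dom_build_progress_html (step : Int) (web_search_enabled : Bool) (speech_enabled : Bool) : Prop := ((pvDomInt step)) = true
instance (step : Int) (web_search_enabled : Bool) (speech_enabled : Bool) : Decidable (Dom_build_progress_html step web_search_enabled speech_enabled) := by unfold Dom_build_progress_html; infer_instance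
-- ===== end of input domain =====

-- B replaces A's enumerate loop (segments list + join) by a direct recursive renderer
-- carrying a countdown k = step - position and interleaving " → " as it goes; alternative decomposition, same cost.

-- ===== PORT A =====
def build_progress_html (step : Int) (web_search_enabled : Bool) (speech_enabled : Bool) : String :=
  let base_phases : List String :=
    ["Handle Input", "Build Prompt", "Inject RAG", "Add System", "Assemble History",
     "Check Model", "Generate Stream", "Split Thinking", "Format Response"]
  let phases := base_phases.take 6
  let phases := if web_search_enabled then phases ++ ["Producing Research"] ++ ["Assessing Research"] else phases
  let phases := phases ++ ["Generate Stream"]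
  let phases := phases ++ ["Split Thinking"]
  let phases := phases ++ ["Format Response"]
  let phases := if speech_enabled then phases ++ ["Generating TTS"] else phases
  let segments := (PySem.List.enumerate phases 0).foldl (fun acc ip =>
    acc ++ ["<span style=\"color:" ++ (if ip.1 < step then "#00ff00" else if ip.1 = step then "#4488ff" else "#666666") ++ "; font-weight:bold;\">" ++ ip.2 ++ "</span>"]) []
  PySem.Str.join " → " segments

-- ===== PORT B =====
-- Source B's local `render(ps, k)`: head-first recursion with countdown k; never called on [].
def pvRender : List String → Int → String
  | [], _ => ""
  | p :: rest, k =>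
    let head := "<span style=\"color:" ++ (if k > 0 then "#00ff00" else if k = 0 then "#4488ff" else "#666666") ++ "; font-weight:bold;\">" ++ p ++ "</span>"
    match rest with
    | [] => head
    | q :: rest' => head ++ " → " ++ pvRender (q :: rest') (k - 1)

def build_progress_html_alt (step : Int) (web_search_enabled : Bool) (speech_enabled : Bool) : String :=
  let phases : List String :=
    ["Handle Input", "Build Prompt", "Inject RAG", "Add System", "Assemble History", "Check Model"]
      ++ (if web_search_enabled then ["Producing Research", "Assessing Research"] else [])
      ++ ["Generate Stream", "Split Thinking", "Format Response"]
      ++ (if speech_enabled then ["Generating TTS"] else [])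
  pvRender phases step

-- ===== PRECONDITION & SPEC =====
def Spec_build_progress_html (step : Int) (web_search_enabled : Bool) (speech_enabled : Bool) (out : String) : Prop := out = build_progress_html_alt step web_search_enabled speech_enabled
instance (step : Int) (web_search_enabled : Bool) (speech_enabled : Bool) (out : String) : Decidable (Spec_build_progress_html step web_search_enabled speech_enabled out) := by unfold Spec_build_progress_html; infer_instance

-- ===== CLAIM (what is proved, stated in full; the proofs are below) =====
def Claim_equal_build_progress_html : Prop := ∀ (step : Int) (web_search_enabled : Bool) (speech_enabled : Bool), Dom_build_progress_html step web_search_enabled speech_enabled → Spec_build_progress_html step web_search_enabled speech_enabled (build_progress_html step web_search_enabled speech_enabled)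

-- ===== LEMMAS AND PROOFS =====

theorem pv_join_cons_cons (x y : String) (ys : List String) :
    PySem.Str.join " → " (x :: y :: ys) = x ++ " → " ++ PySem.Str.join " → " (y :: ys) := by
  have hd : (PySem.Str.join " → " (x :: y :: ys)).toList
      = (x ++ " → " ++ PySem.Str.join " → " (y :: ys)).toList := by
    simp [PySem.Chars.join_cons_cons]
  exact String.toList_injective hd

theorem pv_join_cons_ne (x : String) (t : List String) (h : t ≠ []) :
    PySem.Str.join " → " (x :: t) = x ++ " → " ++ PySem.Str.join " → " t := by
  cases t with
  | nil => exact absurd rfl h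
  | cons y ys => exact pv_join_cons_cons x y ys

-- A's "join of the enumerate-mapped spans" equals B's countdown renderer,
-- generalized over the start index s (the countdown is k = step - s).
theorem pv_join_enum (phases : List String) : ∀ (s step : Int),
    PySem.Str.join " → " ((PySem.List.enumerate phases s).map (fun ip =>
      "<span style=\"color:" ++ (if ip.1 < step then "#00ff00" else if ip.1 = step then "#4488ff" else "#666666") ++ "; font-weight:bold;\">" ++ ip.2 ++ "</span>"))
    = pvRender phases (step - s) := by
  induction phases with
  | nil => intro s step; simp [PySem.List.enumerate_nil, PySem.Str.join, pvRender]
  | cons p rest ih =>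
    intro s step
    rw [PySem.List.enumerate_cons, List.map_cons]
    have hcol : (if s < step then ("#00ff00" : String) else if s = step then "#4488ff" else "#666666")
        = (if step - s > 0 then "#00ff00" else if step - s = 0 then "#4488ff" else "#666666") := by
      split_ifs <;> first | rfl | omega
    cases rest with
    | nil =>
      simp only [PySem.List.enumerate_nil, List.map_nil]
      rw [show ∀ x : String, PySem.Str.join " → " [x] = x from fun x => by simp [PySem.Str.join]]
      simp only [pvRender, hcol]
    | cons q rest' =>
      rw [pv_join_cons_ne _ _ (by simp [PySem.List.enumerate_cons]), ih (s + 1) step,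
        show step - (s + 1) = step - s - 1 from by ring]
      simp only [pvRender, hcol]

-- s = 0 specialization.
theorem pv_join_enum0 (phases : List String) (step : Int) :
    PySem.Str.join " → " ((PySem.List.enumerate phases 0).map (fun ip =>
      "<span style=\"color:" ++ (if ip.1 < step then "#00ff00" else if ip.1 = step then "#4488ff" else "#666666") ++ "; font-weight:bold;\">" ++ ip.2 ++ "</span>"))
    = pvRender phases step := by
  have h := pv_join_enum phases 0 step
  rwa [Int.sub_zero] at h

-- ===== VERDICT (by name: the statement is the Claim_ definition above) =====
theorem build_progress_html_spec : Claim_equal_build_progress_html := by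
  intro step ws sp _
  unfold Spec_build_progress_html build_progress_html build_progress_html_alt
  cases ws <;> cases sp <;>
    · simp only [if_true, if_false, Bool.false_eq_true]
      rw [PySem.List.foldl_append_singleton_eq_map, List.nil_append]
      exact pv_join_enum0 _ step
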